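-- pv_equiv track=rewrite | github.com/srihari-122/Job-portal | ai_resume_analyzer.py | _get_mobile_recommendations
-- ===== SOURCE A (Python) =====
-- from typing import Dict, List, Any
--
-- def _get_mobile_recommendations(skills: List[str], experience: int) -> List[str]:
--     """Mobile development specific recommendations"""
--     recommendations = []
--
--     if not any('react native' in skill or 'flutter' in skill for skill in skills):
--         recommendations.append("Learn cross-platform mobile development")
--     if not any('ios' in skill or 'android' in skill for skill in skills):
--         recommendations.append("Master native mobile development")
--     if not any('testing' in skill for skill in skills):
--         recommendations.append("Implement mobile app testing strategies")
--     if not any('performance' in skill for skill in skills):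
--         recommendations.append("Learn mobile app performance optimization")
--     if not any('app store' in skill for skill in skills):
--         recommendations.append("Understand app store optimization and deployment")
--
--     return recommendations
-- ===== SOURCE B (Python) =====
-- def _get_mobile_recommendations(skills, experience):
--     """One pass over skills maintaining five flags, then emit messages in order."""
--     cross = native = testing = perf = store = False
--     for skill in skills:
--         if 'react native' in skill or 'flutter' in skill:
--             cross = True
--         if 'ios' in skill or 'android' in skill:
--             native = True
--         if 'testing' in skill:
--             testing = True
--         if 'performance' in skill:
--             perf = True
--         if 'app store' in skill:
--             store = True
--     out = []
--     if not cross: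
--         out.append("Learn cross-platform mobile development")
--     if not native:
--         out.append("Master native mobile development")
--     if not testing:
--         out.append("Implement mobile app testing strategies")
--     if not perf:
--         out.append("Learn mobile app performance optimization")
--     if not store:
--         out.append("Understand app store optimization and deployment")
--     return out
-- ===== Notes on version B (the rewrite author's own statement) =====
-- stated objective: faster
-- what changed: Replaces five separate any()-scans of the skills list by a single pass that maintains five boolean flags and then appends each fixed message whose flag stayed False, in the original order.
import Mathlib
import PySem

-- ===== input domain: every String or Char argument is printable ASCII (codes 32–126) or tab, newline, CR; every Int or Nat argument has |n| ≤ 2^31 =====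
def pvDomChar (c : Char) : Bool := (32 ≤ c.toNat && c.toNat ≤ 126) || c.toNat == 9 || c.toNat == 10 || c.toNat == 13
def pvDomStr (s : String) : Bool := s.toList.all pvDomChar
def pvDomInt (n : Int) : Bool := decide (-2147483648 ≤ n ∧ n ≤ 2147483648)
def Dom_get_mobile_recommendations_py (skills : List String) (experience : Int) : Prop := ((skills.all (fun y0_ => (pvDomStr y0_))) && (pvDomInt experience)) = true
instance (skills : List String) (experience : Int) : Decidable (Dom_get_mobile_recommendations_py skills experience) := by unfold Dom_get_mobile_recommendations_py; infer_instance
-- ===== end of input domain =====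

-- ===== PORT A =====
-- Header: B merges A's five any()-scans into one pass with boolean flags; same output order (objective: alternative).
def get_mobile_recommendations_py (skills : List String) (experience : Int) : List String :=
  let recommendations : List String := []
  let recommendations := if !(skills.any (fun skill => PySem.Str.isIn "react native" skill || PySem.Str.isIn "flutter" skill)) then recommendations ++ ["Learn cross-platform mobile development"] else recommendations
  let recommendations := if !(skills.any (fun skill => PySem.Str.isIn "ios" skill || PySem.Str.isIn "android" skill)) then recommendations ++ ["Master native mobile development"] else recommendations
  let recommendations := if !(skills.any (fun skill => PySem.Str.isIn "testing" skill)) then recommendations ++ ["Implement mobile app testing strategies"] else recommendations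
  let recommendations := if !(skills.any (fun skill => PySem.Str.isIn "performance" skill)) then recommendations ++ ["Learn mobile app performance optimization"] else recommendations
  let recommendations := if !(skills.any (fun skill => PySem.Str.isIn "app store" skill)) then recommendations ++ ["Understand app store optimization and deployment"] else recommendations
  recommendations

-- ===== PORT B =====
def get_mobile_recommendations_py_alt (skills : List String) (experience : Int) : List String :=
  let flags : Bool × Bool × Bool × Bool × Bool :=
    skills.foldl (fun f skill =>
      let cross := if PySem.Str.isIn "react native" skill || PySem.Str.isIn "flutter" skill then true else f.1
      let native := if PySem.Str.isIn "ios" skill || PySem.Str.isIn "android" skill then true else f.2.1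
      let testing := if PySem.Str.isIn "testing" skill then true else f.2.2.1
      let perf := if PySem.Str.isIn "performance" skill then true else f.2.2.2.1
      let store := if PySem.Str.isIn "app store" skill then true else f.2.2.2.2
      (cross, native, testing, perf, store)) (false, false, false, false, false)
  let out : List String := []
  let out := if !flags.1 then out ++ ["Learn cross-platform mobile development"] else out
  let out := if !flags.2.1 then out ++ ["Master native mobile development"] else out
  let out := if !flags.2.2.1 then out ++ ["Implement mobile app testing strategies"] else out
  let out := if !flags.2.2.2.1 then out ++ ["Learn mobile app performance optimization"] else out
  let out := if !flags.2.2.2.2 then out ++ ["Understand app store optimization and deployment"] else out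
  out

-- ===== PRECONDITION & SPEC =====
def Spec_get_mobile_recommendations_py (skills : List String) (experience : Int) (out : List String) : Prop := out = get_mobile_recommendations_py_alt skills experience
instance (skills : List String) (experience : Int) (out : List String) : Decidable (Spec_get_mobile_recommendations_py skills experience out) := by unfold Spec_get_mobile_recommendations_py; infer_instance

-- ===== CLAIM (what is proved, stated in full; the proofs are below) =====
def Claim_equal_get_mobile_recommendations_py : Prop := ∀ (skills : List String) (experience : Int), Dom_get_mobile_recommendations_py skills experience → Spec_get_mobile_recommendations_py skills experience (get_mobile_recommendations_py skills experience)

-- ===== LEMMAS AND PROOFS =====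

-- The flag fold computes exactly the five any-scans (disjoined with the initial flags).
theorem flags_fold_eq (p1 p2 p3 p4 p5 : String → Bool) (skills : List String) (f : Bool × Bool × Bool × Bool × Bool) :
    skills.foldl (fun f skill =>
      ((if p1 skill then true else f.1),
       (if p2 skill then true else f.2.1),
       (if p3 skill then true else f.2.2.1),
       (if p4 skill then true else f.2.2.2.1),
       (if p5 skill then true else f.2.2.2.2))) f
    = (f.1 || skills.any p1, f.2.1 || skills.any p2, f.2.2.1 || skills.any p3,
       f.2.2.2.1 || skills.any p4, f.2.2.2.2 || skills.any p5) := by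
  induction skills generalizing f with
  | nil => simp
  | cons x xs ih =>
    obtain ⟨a, b, c, d, e⟩ := f
    simp only [List.foldl_cons, ih, List.any_cons]
    by_cases h1 : p1 x <;> by_cases h2 : p2 x <;> by_cases h3 : p3 x <;>
      by_cases h4 : p4 x <;> by_cases h5 : p5 x <;> simp [h1, h2, h3, h4, h5]

-- ===== VERDICT (by name: the statement is the Claim_ definition above) =====
theorem get_mobile_recommendations_py_spec : Claim_equal_get_mobile_recommendations_py := by
  intro skills experience _
  unfold Spec_get_mobile_recommendations_py get_mobile_recommendations_py get_mobile_recommendations_py_alt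
  simp only [flags_fold_eq, Bool.false_or]
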